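-- pv_equiv track=rewrite | github.com/cpetrich/zs2decode | src/zs2decode/parser.py | expand_format
-- ===== SOURCE A (Python) =====
-- def expand_format(fmt):
--     """Expand a format including multiple applications of a token
--        into a sequence without multiplication.
--        Also works with lists and nested lists."""
--     # this function may be of broader interest to those interpreting format string and data
--     if fmt.count('(') != fmt.count(')'): raise ValueError('Brackets do not balance in %r' % fmt)
--     if fmt.find(')') < fmt.find('('): raise ValueError('Closing bracket before opening in %r' % fmt)
--     out, fmt_idx, times = '', 0, None
--     while fmt_idx < len(fmt):
--         char = fmt[fmt_idx]
--         if char>='0' and char<='9':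
--             times = (times or 0) * 10 + (ord(char)-ord('0'))
--             fmt_idx += 1
--         elif char == '(':
--             close_idx, nesting = fmt_idx + 1, 0
--             while fmt[close_idx] != ')' or nesting>0:
--                 if fmt[close_idx] == '(': nesting += 1
--                 elif fmt[close_idx] == ')': nesting -= 1
--                 close_idx += 1
--             out += ('(%s)' % expand_format(fmt[fmt_idx+1:close_idx]))*(times if times is not None else 1)
--             times = None
--             fmt_idx = close_idx + 1
--         else:
--             out += char*(times if times is not None else 1)
--             times = None
--             fmt_idx += 1
--     return out
-- ===== SOURCE B (Python) =====
-- def expand_format(fmt):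
--     """Expand a format including multiple applications of a token
--        into a sequence without multiplication.
--        Also works with lists and nested lists."""
--     # Single pass with an explicit stack instead of index scans + recursion.
--     stack = []
--     cur, times = '', None
--     for ch in fmt:
--         if '0' <= ch <= '9':
--             times = (times or 0) * 10 + (ord(ch) - ord('0'))
--         elif ch == '(':
--             stack.append((cur, times))
--             cur, times = '', None
--         elif ch == ')':
--             if not stack:
--                 raise ValueError('Closing bracket before opening in %r' % fmt)
--             prev, t = stack.pop()
--             cur = prev + ('(' + cur + ')') * (1 if t is None else t)
--             times = None
--         else:
--             cur += ch * (1 if times is None else times)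
--             times = None
--     if stack:
--         raise ValueError('Brackets do not balance in %r' % fmt)
--     return cur
-- ===== Notes on version B (the rewrite author's own statement) =====
-- stated objective: faster
-- what changed: Replaces the recursive descent with per-bracket rescans (each opening bracket triggers a linear matching-scan plus a recursive call that re-counts and re-scans its substring) by a single left-to-right pass keeping an explicit stack of (prefix, multiplier) frames, so every character is examined once.
import Mathlib
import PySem

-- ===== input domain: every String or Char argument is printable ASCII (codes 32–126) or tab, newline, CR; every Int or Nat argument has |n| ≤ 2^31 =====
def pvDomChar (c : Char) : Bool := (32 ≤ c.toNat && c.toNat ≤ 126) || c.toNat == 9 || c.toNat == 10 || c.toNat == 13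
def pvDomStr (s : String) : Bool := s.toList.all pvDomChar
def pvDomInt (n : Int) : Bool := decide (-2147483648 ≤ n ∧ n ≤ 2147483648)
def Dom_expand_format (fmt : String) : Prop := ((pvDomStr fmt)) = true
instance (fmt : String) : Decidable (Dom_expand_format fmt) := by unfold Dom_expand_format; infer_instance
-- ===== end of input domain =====

-- B replaces A's recursive descent (each '(' rescans for its matching ')' and recurses on the
-- substring, re-counting brackets each time) by a single left-to-right pass with an explicit stack
-- of (prefix, multiplier) frames; objective: faster (every character is visited once).

-- ===== PORT A =====
-- A's inner while loop: starting just after a '(', walk to the matching ')' (nesting counter),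
-- returning (chars before it, chars after it); none = the scan runs off the end (IndexError in A).
def scanClose : List Char → Nat → Option (List Char × List Char)
  | [], _ => none
  | c :: cs, nesting =>
    if c = ')' ∧ nesting = 0 then some ([], cs)
    else
      let nesting' := if c = '(' then nesting + 1 else if c = ')' then nesting - 1 else nesting
      match scanClose cs nesting' with
      | some (inner, after) => some (c :: inner, after)
      | none => none

-- needed by the termination argument of the mutual recursion below
theorem scanClose_length : ∀ (cs : List Char) (n : Nat) (inner after : List Char),
    scanClose cs n = some (inner, after) → inner.length + after.length + 1 = cs.length := by
  intro cs
  induction cs with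
  | nil => intro n i a h; simp [scanClose] at h
  | cons c cs ih =>
    intro n i a h
    by_cases hc : c = ')' ∧ n = 0
    · simp [scanClose, hc] at h
      obtain ⟨rfl, rfl⟩ := h
      simp
    · simp only [scanClose, if_neg hc] at h
      cases hm : scanClose cs (if c = '(' then n + 1 else if c = ')' then n - 1 else n) with
      | none => rw [hm] at h; simp at h
      | some p =>
        rw [hm] at h
        obtain ⟨i', a'⟩ := p
        simp at h
        obtain ⟨rfl, rfl⟩ := h
        have := ih _ i' a' hm
        simp [← this]
        omega

mutual
-- the recursive function expand_format itself (A raises ValueError at the two checks and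
-- IndexError when the scan runs off the end; those inputs are excluded by Pre_, [] is a dummy)
def expandFmtA (fmt : List Char) : List Char :=
  if PySem.Chars.count fmt ['('] ≠ PySem.Chars.count fmt [')'] then []
  else if PySem.Chars.find fmt [')'] < PySem.Chars.find fmt ['('] then []
  else loopA fmt none
  termination_by 2 * fmt.length + 1
  decreasing_by omega

-- A's outer while loop; 'out += X' is rendered as 'X ++ <rest of the loop>'
def loopA : List Char → Option Nat → List Char
  | [], _ => []
  | c :: cs, times =>
    if '0' ≤ c ∧ c ≤ '9' then
      loopA cs (some ((times.getD 0) * 10 + (c.toNat - 48)))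
    else if c = '(' then
      match h : scanClose cs 0 with
      | some (inner, after) =>
        (List.replicate (times.getD 1) ('(' :: expandFmtA inner ++ [')'])).flatten
          ++ loopA after none
      | none => []
    else
      List.replicate (times.getD 1) c ++ loopA cs none
  termination_by l _ => 2 * l.length
  decreasing_by
  all_goals simp only [List.length_cons]
  all_goals try omega
  all_goals (have := scanClose_length cs 0 inner after h; omega)
end

def expand_format (fmt : String) : String := String.ofList (expandFmtA fmt.toList)

-- ===== PORT B =====
-- Source B's loop body: state = some (stack, cur, times); none = Source B has raised ValueError
def stepB (st : Option (List (List Char × Option Nat) × List Char × Option Nat)) (c : Char) :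
    Option (List (List Char × Option Nat) × List Char × Option Nat) :=
  match st with
  | none => none
  | some (stack, cur, times) =>
    if '0' ≤ c ∧ c ≤ '9' then some (stack, cur, some ((times.getD 0) * 10 + (c.toNat - 48)))
    else if c = '(' then some ((cur, times) :: stack, [], none)
    else if c = ')' then
      match stack with
      | [] => none
      | (prev, t) :: rest =>
        some (rest, prev ++ (List.replicate (t.getD 1) ('(' :: cur ++ [')'])).flatten, none)
    else some (stack, cur ++ List.replicate (times.getD 1) c, none)

def expand_format_alt (fmt : String) : String :=
  match fmt.toList.foldl stepB (some ([], [], none)) with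
  | some ([], cur, _) => String.ofList cur
  | _ => ""   -- Source B raises ValueError here (leftover stack / popped empty); excluded by Pre_

-- ===== PRECONDITION & SPEC =====
-- bracket-balance check: running depth, none as soon as a ')' over-closes, final depth returned
def runBal : List Char → Nat → Option Nat
  | [], n => some n
  | c :: cs, n =>
    if c = '(' then runBal cs (n + 1)
    else if c = ')' then (if n = 0 then none else runBal cs (n - 1))
    else runBal cs n

-- Pre_ excludes exactly the inputs on which A raises (and B raises too): strings whose
-- parentheses are not properly nested (A: ValueError or IndexError; B: ValueError).
def Pre_expand_format (fmt : String) : Prop := runBal fmt.toList 0 = some 0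
instance (fmt : String) : Decidable (Pre_expand_format fmt) := by
  unfold Pre_expand_format; infer_instance

def pvWitness_expand_format : String := "2(3ab)c"

def Spec_expand_format (fmt : String) (out : String) : Prop := out = expand_format_alt fmt
instance (fmt : String) (out : String) : Decidable (Spec_expand_format fmt out) := by
  unfold Spec_expand_format; infer_instance

-- ===== CLAIM (what is proved, stated in full; the proofs are below) =====
def Claim_equal_expand_format : Prop :=
  ∀ (fmt : String), Dom_expand_format fmt → Pre_expand_format fmt →
    Spec_expand_format fmt (expand_format fmt)

-- ===== LEMMAS AND PROOFS =====

theorem runBal_append (x y : List Char) (n : Nat) :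
    runBal (x ++ y) n = (runBal x n).bind (runBal y) := by
  induction x generalizing n with
  | nil => simp [runBal]
  | cons c cs ih =>
    by_cases h1 : c = '('
    · simp [runBal, h1, ih]
    · by_cases h2 : c = ')'
      · by_cases h3 : n = 0 <;> simp [runBal, h2, h3, ih]
      · simp [runBal, h1, h2, ih]

theorem runBal_count (s : List Char) : ∀ (n m : Nat), runBal s n = some m →
    s.count '(' + n = s.count ')' + m := by
  induction s with
  | nil => intro n m h; simp [runBal] at h; simp [h]
  | cons c cs ih =>
    intro n m h
    by_cases h1 : c = '('
    · subst h1
      simp only [runBal, reduceIte] at h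
      have := ih _ _ h
      simp
      omega
    · by_cases h2 : c = ')'
      · subst h2
        simp only [runBal, reduceIte] at h
        by_cases h3 : n = 0
        · simp [h3] at h
        · rw [if_neg h3] at h
          have := ih _ _ h
          simp
          omega
      · simp only [runBal, if_neg h1, if_neg h2] at h
        have := ih _ _ h
        simp [h1, h2]
        omega

theorem runBal_shift (s : List Char) : ∀ (n m k : Nat), runBal s n = some m →
    runBal s (n + k) = some (m + k) := by
  induction s with
  | nil => intro n m k h; simp [runBal] at h ⊢; omega
  | cons c cs ih =>
    intro n m k h
    by_cases h1 : c = '('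
    · simp only [runBal, h1, reduceIte] at h ⊢
      rw [show n + k + 1 = (n + 1) + k by omega]
      exact ih _ _ _ h
    · by_cases h2 : c = ')'
      · simp only [runBal, h2, reduceIte] at h ⊢
        by_cases h3 : n = 0
        · simp [h3] at h
        · rw [if_neg h3] at h
          rw [if_neg (by omega : ¬ n + k = 0)]
          rw [show n + k - 1 = (n - 1) + k by omega]
          exact ih _ _ _ h
      · simp only [runBal, h1, h2, reduceIte] at h ⊢
        exact ih _ _ _ h

-- a balanced segment closing into the enclosing bracket splits at the matching ')'
theorem runBal_split : ∀ (N : Nat) (s : List Char), s.length ≤ N → ∀ (n : Nat),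
    runBal s (n + 1) = some 0 →
    ∃ inner after, s = inner ++ ')' :: after ∧
      runBal inner 0 = some 0 ∧ runBal after n = some 0 := by
  intro N
  induction N with
  | zero =>
    intro s hs n h
    obtain rfl : s = [] := List.length_eq_zero_iff.mp (by omega)
    simp [runBal] at h
  | succ N ihN =>
    intro s hs n h
    match s with
    | [] => simp [runBal] at h
    | c :: cs =>
      have hcs : cs.length ≤ N := by simp at hs; omega
      by_cases h1 : c = '('
      · subst h1
        simp only [runBal, reduceIte] at h
        -- cs closes n+2 opens; split cs at the ')' matching our new '('
        obtain ⟨i1, a1, rfl, hi1, ha1⟩ := ihN cs hcs (n + 1) h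
        -- a1 closes n+1 opens; split it again at the ')' matching the enclosing bracket
        obtain ⟨i2, a2, rfl, hi2, ha2⟩ := ihN a1 (by simp at hcs; omega) n ha1
        refine ⟨'(' :: i1 ++ ')' :: i2, a2, by simp, ?_, ha2⟩
        simp only [runBal, reduceIte, List.cons_append]
        rw [runBal_append]
        rw [show runBal i1 1 = some 1 from by simpa using runBal_shift i1 0 0 1 hi1]
        simpa [runBal] using hi2
      · by_cases h2 : c = ')'
        · subst h2
          simp only [runBal, reduceIte] at h
          simp only [Nat.add_sub_cancel] at h
          exact ⟨[], cs, rfl, by simp [runBal], by simpa using h⟩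
        · simp only [runBal, if_neg h1, if_neg h2] at h
          obtain ⟨i, a, rfl, hi, ha⟩ := ihN cs hcs n h
          exact ⟨c :: i, a, rfl, by simpa [runBal, h1, h2] using hi, ha⟩

-- A's scan finds exactly the matching ')' of a balanced inner segment
theorem scanClose_through : ∀ (inner : List Char) (n m : Nat) (after : List Char),
    runBal inner n = some m →
    scanClose (inner ++ ')' :: after) n =
      if m = 0 then some (inner, after)
      else (scanClose after (m - 1)).map (fun p => (inner ++ ')' :: p.1, p.2)) := by
  intro inner
  induction inner with
  | nil =>
    intro n m after h
    simp [runBal] at h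
    subst h
    by_cases h0 : n = 0
    · simp [scanClose, h0]
    · simp only [List.nil_append, scanClose, h0, and_false, if_false, reduceIte]
      cases hm : scanClose after (n - 1) with
      | none => simp [hm]
      | some p => obtain ⟨i, a⟩ := p; simp [hm]
  | cons c cs ih =>
    intro n m after h
    by_cases h1 : c = '('
    · subst h1
      simp only [runBal, reduceIte] at h
      have := ih (n + 1) m after h
      simp only [List.cons_append, scanClose, reduceIte, this]
      by_cases hm : m = 0
      · simp [hm]
      · simp only [if_neg hm]
        cases scanClose after (m - 1) with
        | none => simp
        | some p => simp
    · by_cases h2 : c = ')'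
      · subst h2
        simp only [runBal, Char.reduceEq, reduceIte] at h
        by_cases h3 : n = 0
        · simp [h3] at h
        · rw [if_neg h3] at h
          have := ih (n - 1) m after h
          simp only [List.cons_append, scanClose]
          rw [if_neg (by simp [h3])]
          simp only [Char.reduceEq, reduceIte, this]
          by_cases hm : m = 0
          · simp [hm]
          · simp only [if_neg hm]
            cases scanClose after (m - 1) with
            | none => simp
            | some p => simp
      · simp only [runBal, h1, h2, reduceIte] at h
        have := ih n m after h
        simp only [List.cons_append, scanClose, h1, h2, reduceIte, this]
        by_cases hm : m = 0
        · simp [hm]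
        · simp only [if_neg hm]
          cases scanClose after (m - 1) with
          | none => simp
          | some p => simp

theorem count_go_singleton (c : Char) : ∀ (fuel : Nat) (l : List Char) (acc : Nat),
    l.length ≤ fuel → PySem.Chars.count.go [c] fuel l acc = acc + l.count c := by
  intro fuel
  induction fuel with
  | zero =>
    intro l acc hl
    obtain rfl : l = [] := List.length_eq_zero_iff.mp (by omega)
    simp [PySem.Chars.count.go]
  | succ fuel ih =>
    intro l acc hl
    match l with
    | [] => simp [PySem.Chars.count.go]
    | a :: t =>
      simp only [PySem.Chars.count.go]
      by_cases hac : a = c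
      · subst hac
        rw [if_pos (by simp [List.isPrefixOf])]
        rw [show List.drop [a].length (a :: t) = t by simp]
        rw [ih t (acc + 1) (by simp at hl; omega)]
        simp
        omega
      · rw [if_neg (by simp [List.isPrefixOf]; intro hh; exact absurd hh.symm hac)]
        rw [ih t acc (by simp at hl; omega)]
        simp [hac]

theorem count_singleton (s : List Char) (c : Char) :
    PySem.Chars.count s [c] = s.count c := by
  simp [PySem.Chars.count, count_go_singleton c s.length s 0 le_rfl]

theorem singleton_prefix_drop (l : List Char) (i : Nat) (c : Char) :
    [c] <+: l.drop i ↔ l[i]? = some c := by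
  rw [← List.head?_drop]
  cases l.drop i <;> simp [List.prefix_cons_iff, eq_comm]

-- on a balanced string no ')' precedes every '('
theorem runBal_no_close_first (s : List Char) : ∀ (i : Nat) (m : Nat),
    runBal s 0 = some m → s[i]? = some ')' → (∀ k < i, s[k]? ≠ some ')') →
    ∃ k < i, s[k]? = some '(' := by
  induction s with
  | nil => intro i m h hi hbefore; simp at hi
  | cons c cs ih =>
    intro i m h hi hbefore
    match i with
    | 0 =>
      simp at hi
      subst hi
      simp [runBal] at h
    | i + 1 =>
      by_cases h1 : c = '('
      · exact ⟨0, by omega, by simp [h1]⟩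
      · have h2 : c ≠ ')' := by
          intro hc
          exact hbefore 0 (by omega) (by simp [hc])
        simp only [runBal, h1, h2, reduceIte] at h
        obtain ⟨k, hk, hk2⟩ := ih i m h (by simpa using hi)
          (fun k hk => by simpa using hbefore (k + 1) (by omega))
        exact ⟨k + 1, by omega, by simpa using hk2⟩

-- on a balanced string both of A's ValueError checks pass
theorem checks_pass (s : List Char) (h : runBal s 0 = some 0) :
    expandFmtA s = loopA s none := by
  have hcount : s.count '(' = s.count ')' := by have := runBal_count s 0 0 h; omega
  have hfind : ¬ PySem.Chars.find s [')'] < PySem.Chars.find s ['('] := by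
    by_cases hcl : 0 ≤ PySem.Chars.find s [')']
    · obtain ⟨hpre, hmin⟩ := PySem.Chars.find_spec hcl
      have hclose : s[(PySem.Chars.find s [')']).toNat]? = some ')' :=
        (singleton_prefix_drop s _ ')').mp hpre
      have hbefore : ∀ k < (PySem.Chars.find s [')']).toNat, s[k]? ≠ some ')' := by
        intro k hk hcontra
        exact hmin k hk ((singleton_prefix_drop s k ')').mpr hcontra)
      obtain ⟨k, hk, hkopen⟩ := runBal_no_close_first s _ 0 h hclose hbefore
      have hop : 0 ≤ PySem.Chars.find s ['('] := by
        rw [PySem.Chars.find_nonneg_iff, List.singleton_infix_iff]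
        exact List.mem_of_getElem? hkopen
      obtain ⟨_, hmin2⟩ := PySem.Chars.find_spec hop
      have hk2 : ¬ k < (PySem.Chars.find s ['(']).toNat := by
        intro hlt
        exact hmin2 k hlt ((singleton_prefix_drop s k '(').mpr hkopen)
      omega
    · have h1 : -1 ≤ PySem.Chars.find s [')'] := PySem.Chars.neg_one_le_find _ _
      have h2 : ¬ 0 ≤ PySem.Chars.find s ['('] := by
        rw [PySem.Chars.find_nonneg_iff, List.singleton_infix_iff]
        intro hmem
        have : ¬ [')'] <:+: s := by
          rw [← PySem.Chars.find_nonneg_iff]; exact hcl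
        rw [List.singleton_infix_iff] at this
        have hc0 : s.count ')' = 0 := List.count_eq_zero.mpr this
        have := List.count_pos_iff.mpr hmem
        omega
      have h3 : -1 ≤ PySem.Chars.find s ['('] := PySem.Chars.neg_one_le_find _ _
      omega
  rw [expandFmtA]
  rw [if_neg (by simp [count_singleton, hcount])]
  rw [if_neg hfind]

-- core invariant: B's fold consumes a balanced segment exactly like A's loop,
-- leaving the stack untouched and appending A's output to cur
theorem foldB_balanced : ∀ (N : Nat) (s : List Char), s.length < N → runBal s 0 = some 0 →
    ∀ (stack : List (List Char × Option Nat)) (cur : List Char) (t : Option Nat)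
      (rest : List Char),
    ∃ t', List.foldl stepB (some (stack, cur, t)) (s ++ rest) =
      List.foldl stepB (some (stack, cur ++ loopA s t, t')) rest := by
  intro N
  induction N with
  | zero => intro s hs; omega
  | succ N ihN =>
    intro s hs hbal stack cur t rest
    match s with
    | [] => exact ⟨t, by simp [loopA]⟩
    | c :: cs =>
      have hcs : cs.length < N := by simp at hs; omega
      by_cases hd : '0' ≤ c ∧ c ≤ '9'
      · -- digit: both sides accumulate into times
        have hne1 : c ≠ '(' := by rintro rfl; exact absurd hd (by decide)
        have hne2 : c ≠ ')' := by rintro rfl; exact absurd hd (by decide)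
        simp only [runBal, hne1, hne2, reduceIte] at hbal
        obtain ⟨t', ht'⟩ := ihN cs hcs hbal stack cur
          (some ((t.getD 0) * 10 + (c.toNat - 48))) rest
        refine ⟨t', ?_⟩
        simp only [List.cons_append, List.foldl_cons, stepB, if_pos hd]
        rw [ht']
        simp only [loopA, if_pos hd]
      · by_cases h1 : c = '('
        · subst h1
          simp only [runBal, reduceIte] at hbal
          obtain ⟨inner, after, rfl, hinner, hafter⟩ :=
            runBal_split cs.length cs le_rfl 0 hbal
          have hleni : inner.length < N := by
            have := List.length_append (as := inner) (bs := ')' :: after)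
            simp at this hcs ⊢; omega
          have hlena : after.length < N := by
            simp at hcs ⊢; omega
          obtain ⟨t1, ht1⟩ := ihN inner hleni hinner ((cur, t) :: stack) [] none
            (')' :: (after ++ rest))
          obtain ⟨t2, ht2⟩ := ihN after hlena hafter stack
            (cur ++ (List.replicate (t.getD 1)
              ('(' :: loopA inner none ++ [')'])).flatten) none rest
          refine ⟨t2, ?_⟩
          calc List.foldl stepB (some (stack, cur, t)) (('(' :: (inner ++ ')' :: after)) ++ rest)
              = List.foldl stepB (some ((cur, t) :: stack, [], none))
                  (inner ++ (')' :: (after ++ rest))) := by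
                simp only [List.cons_append, List.foldl_cons, stepB, if_neg hd, reduceIte]
                simp
            _ = List.foldl stepB (some ((cur, t) :: stack, [] ++ loopA inner none, t1))
                  (')' :: (after ++ rest)) := ht1
            _ = List.foldl stepB (some (stack, cur ++ (List.replicate (t.getD 1)
                  ('(' :: loopA inner none ++ [')'])).flatten, none)) (after ++ rest) := by
                simp only [List.foldl_cons, stepB]
                rw [if_neg (by decide : ¬('0' ≤ ')' ∧ ')' ≤ '9'))]
                simp only [Char.reduceEq, reduceIte, List.nil_append]
            _ = List.foldl stepB (some (stack, (cur ++ (List.replicate (t.getD 1)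
                  ('(' :: loopA inner none ++ [')'])).flatten) ++ loopA after none, t2))
                  rest := ht2
            _ = List.foldl stepB (some (stack, cur ++ loopA ('(' :: (inner ++ ')' :: after)) t,
                  t2)) rest := by
                simp only [loopA, if_neg hd, reduceIte]
                rw [scanClose_through inner 0 0 after hinner]
                simp [checks_pass inner hinner, List.append_assoc]
        · by_cases h2 : c = ')'
          · subst h2
            simp [runBal] at hbal
          · -- ordinary character: emitted (possibly repeated) immediately
            simp only [runBal, h1, h2, reduceIte] at hbal
            obtain ⟨t', ht'⟩ := ihN cs hcs hbal stack
              (cur ++ List.replicate (t.getD 1) c) none rest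
            refine ⟨t', ?_⟩
            simp only [List.cons_append, List.foldl_cons, stepB, if_neg hd, if_neg h1,
              if_neg h2]
            rw [ht']
            simp only [loopA, if_neg hd, if_neg h1, List.append_assoc]

-- ===== VERDICT (by name: the statement is the Claim_ definition above) =====
theorem expand_format_spec : Claim_equal_expand_format := by
  intro fmt _ hpre
  unfold Spec_expand_format expand_format expand_format_alt
  have h : runBal fmt.toList 0 = some 0 := hpre
  obtain ⟨t', ht⟩ := foldB_balanced (fmt.toList.length + 1) fmt.toList (by omega) h
      [] [] none []
  rw [List.append_nil] at ht
  rw [ht]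
  simp [checks_pass fmt.toList h]
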